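-- pv_equiv track=rewrite | github.com/NaveenG0107/python-training | stringPositionChange.py | stringPositionTwo
-- ===== SOURCE A (Python) =====
-- def stringPositionTwo(userInput):
--     sortValue = ""
--     count = 0
--     result =""
--     for i in userInput:
--         if(i == "#"):
--             sortValue = sortValue +""
--             count += 1
--         else:
--             sortValue = sortValue + i
--     for i in range(count):
--         result += "#"
--     return result + sortValue
-- ===== SOURCE B (Python) =====
-- def stringPositionTwo(userInput):
--     # Stable sort: keys are False for '#' and True otherwise, so every '#'
--     # moves to the front while the remaining characters keep their order.
--     return "".join(sorted(userInput, key=lambda c: c != "#"))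
-- ===== Notes on version B (the rewrite author's own statement) =====
-- stated objective: alternative
-- what changed: Replaces A's two accumulator loops (filter-and-count, then re-emit '#'s) with a single stable sort of the characters keyed by the boolean c != '#', which moves every '#' to the front while preserving the order of the rest.
import Mathlib
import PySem

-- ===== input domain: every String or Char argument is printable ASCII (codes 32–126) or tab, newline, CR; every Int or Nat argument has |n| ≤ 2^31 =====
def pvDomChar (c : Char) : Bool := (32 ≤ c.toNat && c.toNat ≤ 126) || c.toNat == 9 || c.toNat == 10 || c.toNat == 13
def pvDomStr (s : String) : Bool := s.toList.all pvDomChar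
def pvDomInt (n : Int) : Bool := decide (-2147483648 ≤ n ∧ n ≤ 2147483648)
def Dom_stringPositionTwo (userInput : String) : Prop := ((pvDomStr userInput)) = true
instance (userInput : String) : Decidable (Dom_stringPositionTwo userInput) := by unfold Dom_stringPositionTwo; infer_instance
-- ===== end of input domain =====

-- B replaces A's two accumulator loops by one stable sort keyed by (c != '#') (alternative algorithm).

-- ===== PORT A =====
def stringPositionTwo (userInput : String) : String :=
  let st := userInput.toList.foldl
    (fun (s : List Char × Int) i =>
      if i == '#' then (s.1 ++ [], s.2 + 1) else (s.1 ++ [i], s.2))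
    (([] : List Char), (0 : Int))
  let result := (PySem.List.pyRange 0 st.2 1).foldl
    (fun (r : List Char) _ => r ++ ['#']) []
  String.ofList (result ++ st.1)

-- ===== PORT B =====
def stringPositionTwo_alt (userInput : String) : String :=
  String.ofList (PySem.List.sorted userInput.toList (fun c => c != '#') false)

-- ===== PRECONDITION & SPEC =====
def Spec_stringPositionTwo (userInput : String) (out : String) : Prop := out = stringPositionTwo_alt userInput
instance (userInput : String) (out : String) : Decidable (Spec_stringPositionTwo userInput out) := by unfold Spec_stringPositionTwo; infer_instance

-- ===== CLAIM (what is proved, stated in full; the proofs are below) =====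
def Claim_equal_stringPositionTwo : Prop := ∀ (userInput : String), Dom_stringPositionTwo userInput → Spec_stringPositionTwo userInput (stringPositionTwo userInput)

-- ===== LEMMAS AND PROOFS =====

-- the comparison insertion sort uses for B's key
def pvBefore : Char → Char → Bool := fun a b => decide ((a != '#') < (b != '#'))

-- inserting '#' lands right after the leading block of '#'s
theorem insertBy_hash (hs rest : List Char) (hh : ∀ h ∈ hs, h = '#')
    (hr : ∀ r ∈ rest, r ≠ '#') :
    PySem.List.insertBy pvBefore '#' (hs ++ rest) = hs ++ '#' :: rest := by
  induction hs with
  | nil =>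
    cases rest with
    | nil => rfl
    | cons r rs =>
      have : pvBefore '#' r = true := by
        have : r ≠ '#' := hr r (by simp)
        simp [pvBefore, this, Bool.lt_iff]
      simp [PySem.List.insertBy, this]
  | cons h t ih =>
    have hh0 : h = '#' := hh h (by simp)
    have : pvBefore '#' h = false := by simp [pvBefore, hh0]
    simp only [List.cons_append, PySem.List.insertBy, this, Bool.false_eq_true, if_false]
    rw [ih (fun x hx => hh x (by simp [hx]))]

-- inserting a non-'#' character appends it at the end (it is never "before" anything)
theorem insertBy_nonhash (x : Char) (hx : x ≠ '#') (ys : List Char) :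
    PySem.List.insertBy pvBefore x ys = ys ++ [x] := by
  apply PySem.List.insertBy_of_forall_not_before
  intro y _
  simp [pvBefore, hx, Bool.lt_iff]

-- the insertion-sort fold keeps the state split as "hashes so far ++ others so far"
theorem foldl_insertBy_split (xs : List Char) : ∀ (hs rest : List Char),
    (∀ h ∈ hs, h = '#') → (∀ r ∈ rest, r ≠ '#') →
    xs.foldl (fun acc x => PySem.List.insertBy pvBefore x acc) (hs ++ rest)
      = hs ++ xs.filter (fun c => c == '#') ++ (rest ++ xs.filter (fun c => c != '#')) := by
  induction xs with
  | nil => intro hs rest _ _; simp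
  | cons x t ih =>
    intro hs rest hh hr
    rw [List.foldl_cons]
    by_cases hx : x = '#'
    · subst hx
      rw [insertBy_hash hs rest hh hr]
      have : hs ++ '#' :: rest = (hs ++ ['#']) ++ rest := by simp
      rw [this, ih (hs ++ ['#']) rest
        (by intro h hm; rcases List.mem_append.1 hm with h1 | h1
            · exact hh h h1
            · simpa using h1) hr]
      simp
    · rw [insertBy_nonhash x hx (hs ++ rest)]
      have : hs ++ rest ++ [x] = hs ++ (rest ++ [x]) := by simp
      rw [this, ih hs (rest ++ [x]) hh
        (by intro r hm; rcases List.mem_append.1 hm with h1 | h1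
            · exact hr r h1
            · exact (by simpa using h1 : r = x) ▸ hx)]
      simp [hx]

-- B's sort, characterised: the '#'s (in place count order) followed by the rest in order
theorem sorted_split (l : List Char) :
    PySem.List.sorted l (fun c => c != '#') false
      = l.filter (fun c => c == '#') ++ l.filter (fun c => c != '#') := by
  rw [PySem.List.sorted_eq_foldl_insertBy]
  have := foldl_insertBy_split l [] [] (by simp) (by simp)
  simpa [pvBefore] using this

-- A's first loop, as a pair fold: filtered chars and the '#' count.
theorem foldA (l : List Char) : ∀ (sv : List Char) (cnt : Int),
    l.foldl (fun (s : List Char × Int) i =>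
      if i == '#' then (s.1 ++ [], s.2 + 1) else (s.1 ++ [i], s.2)) (sv, cnt)
    = (sv ++ l.filter (fun c => !(c == '#')), cnt + l.count '#') := by
  induction l with
  | nil => intro sv cnt; simp
  | cons c t ih =>
    intro sv cnt
    rw [List.foldl_cons]
    by_cases hc : c = '#'
    · subst hc
      rw [if_pos (by simp), ih]
      simp
      ring
    · rw [if_neg (by simp [hc]), ih]
      simp [hc]

theorem stringPositionTwo_spec : Claim_equal_stringPositionTwo := by
  unfold Claim_equal_stringPositionTwo Spec_stringPositionTwo
  intro u _
  unfold stringPositionTwo stringPositionTwo_alt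
  rw [foldA, sorted_split]
  simp only [List.nil_append]
  rw [PySem.List.foldl_append_singleton_eq_map]
  simp only [List.nil_append]
  rw [List.map_const', PySem.List.length_pyRange_one, List.filter_beq '#']
  have h0 : ((0:Int) + (List.count '#' u.toList : Int) - 0).toNat = List.count '#' u.toList := by omega
  rw [h0]
  simp [bne]
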